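-- pv_equiv track=rewrite | github.com/MattyB709/CompetitiveProgramming | number_theory/project/project.py | compute_ap
-- ===== SOURCE A (Python) =====
-- def find_legendre_symbols(p):
--     # initialize an array of size p, all filled with -1
--     legendre_symbols = [-1] * p
--     for i in range(1, p): #1..p-1
--         legendre_symbols[(i*i) % p] = 1 # set all squares to 1
--
--     legendre_symbols[0] = 0
--     return legendre_symbols
--
-- def f(x, a, b):
--     return x**3 + a * x + b
--
-- def del_f(x, a):
--     return 3*x**2 + 3*x + a + 1
--
-- def del_2_f(x):
--     return 6*x+6
--
-- def compute_ap(p, a, b):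
--     lookup_table = find_legendre_symbols(p)
--     # calculate the initial values for each function
--     fx = f(0, a, b) % p
--     df = del_f(0, a) % p
--     d2f = del_2_f(0) % p
--     d3f = 6 % p
--     # a_p will be a running sum of the legendre symbols
--     ap = lookup_table[fx]
--     for x in range(1, p): # compute every x in F_p except for 0 using the finite difference formulas
--         fx = fx + df
--         # subtract by p as given in the implementation note, only if x+y >= p
--         fx = fx - p if fx >= p else fx
--
--         df = df + d2f
--         df = df - p if df >= p else df
--
--         d2f = d3f + d2f
--         d2f = d2f - p if d2f >= p else d2f
--
--         ap += lookup_table[fx]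
--
--     return ap
-- ===== SOURCE B (Python) =====
-- def compute_ap(p, a, b):
--     # histogram of f(x) mod p over all x
--     cnt = [0] * p
--     for x in range(p):
--         cnt[(x ** 3 + a * x + b) % p] += 1
--     c0 = cnt[0]
--     # add up, once per distinct nonzero quadratic residue v, how many x hit it;
--     # zeroing the bucket makes repeated squares contribute nothing
--     resid = 0
--     for i in range(1, p):
--         v = (i * i) % p
--         if v:
--             resid += cnt[v]
--             cnt[v] = 0
--     # residues contribute +1, zeros 0, the rest -1
--     return 2 * resid + c0 - p
-- ===== Notes on version B (the rewrite author's own statement) =====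
-- stated objective: alternative
-- what changed: Replaced the Legendre-symbol lookup table and finite-difference update loop by a counting algorithm: build a histogram of f(x) mod p, sum the buckets of the distinct nonzero quadratic residues (zeroing each bucket once read), and return 2*resid + cnt[0] - p.
import Mathlib
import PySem

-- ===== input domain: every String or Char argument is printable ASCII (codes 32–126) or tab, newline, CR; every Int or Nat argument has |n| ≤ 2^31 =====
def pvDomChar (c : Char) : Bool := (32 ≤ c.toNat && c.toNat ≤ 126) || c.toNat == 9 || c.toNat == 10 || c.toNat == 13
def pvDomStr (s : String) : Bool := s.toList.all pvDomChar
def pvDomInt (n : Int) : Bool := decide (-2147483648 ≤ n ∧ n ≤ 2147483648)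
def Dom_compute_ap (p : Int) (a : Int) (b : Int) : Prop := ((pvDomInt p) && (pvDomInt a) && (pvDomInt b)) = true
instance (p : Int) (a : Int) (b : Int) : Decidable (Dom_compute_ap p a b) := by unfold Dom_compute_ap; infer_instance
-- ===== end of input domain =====

-- B drops A's Legendre-symbol table and finite-difference update entirely: it builds a
-- histogram of f(x) mod p, then sums the buckets of the distinct nonzero squares
-- (zeroing each bucket once read), and recovers the character sum as 2*resid + cnt[0] - p.

-- ===== PORT A =====
-- Python list of length p is ported as Array Int (indexing in range inside Pre_)
def find_legendre_symbols (p : Int) : Array Int :=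
  let t0 := Array.replicate p.toNat (-1 : Int)
  let t1 := (PySem.List.pyRange 1 p 1).foldl
      (fun t i => t.setIfInBounds (PySem.Int.mod (i * i) p).toNat 1) t0
  t1.setIfInBounds 0 0

def fA (x a b : Int) : Int := x ^ 3 + a * x + b
def del_f (x a : Int) : Int := 3 * x ^ 2 + 3 * x + a + 1
def del_2_f (x : Int) : Int := 6 * x + 6

def compute_ap (p : Int) (a : Int) (b : Int) : Int :=
  let lookup_table := find_legendre_symbols p
  let fx := PySem.Int.mod (fA 0 a b) p
  let df := PySem.Int.mod (del_f 0 a) p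
  let d2f := PySem.Int.mod (del_2_f 0) p
  let d3f := PySem.Int.mod 6 p
  let ap := lookup_table.getD fx.toNat 0
  let st := (PySem.List.pyRange 1 p 1).foldl
      (fun (s : Int × Int × Int × Int) _ =>
        let fx := s.1 + s.2.1
        let fx := if fx ≥ p then fx - p else fx
        let df := s.2.1 + s.2.2.1
        let df := if df ≥ p then df - p else df
        let d2f := d3f + s.2.2.1
        let d2f := if d2f ≥ p then d2f - p else d2f
        (fx, df, d2f, s.2.2.2 + lookup_table.getD fx.toNat 0))
      (fx, df, d2f, ap)
  st.2.2.2

-- ===== PORT B =====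
def compute_ap_alt (p : Int) (a : Int) (b : Int) : Int :=
  let cnt := (PySem.List.pyRange 0 p 1).foldl
      (fun c x => c.modify (PySem.Int.mod (x ^ 3 + a * x + b) p).toNat (· + 1))
      (Array.replicate p.toNat (0 : Int))
  let c0 := cnt.getD 0 0
  let st := (PySem.List.pyRange 1 p 1).foldl
      (fun (s : Array Int × Int) i =>
        let v := PySem.Int.mod (i * i) p
        if v ≠ 0 then (s.1.setIfInBounds v.toNat 0, s.2 + s.1.getD v.toNat 0)
        else s) (cnt, 0)
  2 * st.2 + c0 - p

-- ===== PRECONDITION & SPEC =====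
-- Pre_: A indexes a table of length p, so it raises IndexError for every p ≤ 0.
def Pre_compute_ap (p : Int) (a : Int) (b : Int) : Prop := 1 ≤ p
instance (p : Int) (a : Int) (b : Int) : Decidable (Pre_compute_ap p a b) := by
  unfold Pre_compute_ap; infer_instance
def pvWitness_compute_ap : Int × Int × Int := (7, 2, 3)

def Spec_compute_ap (p : Int) (a : Int) (b : Int) (out : Int) : Prop := out = compute_ap_alt p a b
instance (p : Int) (a : Int) (b : Int) (out : Int) : Decidable (Spec_compute_ap p a b out) := by
  unfold Spec_compute_ap; infer_instance

-- ===== CLAIM (what is proved, stated in full; the proofs are below) =====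
def Claim_equal_compute_ap : Prop := ∀ (p : Int) (a : Int) (b : Int), Dom_compute_ap p a b → Pre_compute_ap p a b → Spec_compute_ap p a b (compute_ap p a b)

-- ===== LEMMAS AND PROOFS =====

-- the list of quadratic residues mod p that A's table marks with 1
def sqL (p : Int) : List Int :=
  (PySem.List.pyRange 1 p 1).map (fun i => PySem.Int.mod (i * i) p)

-- A's table entry at a reduced value j ∈ [0, p)
def clsv (p j : Int) : Int := if j = 0 then 0 else if j ∈ sqL p then 1 else -1

-- Bool predicate: w is the bucket of a nonzero square of some i ∈ L
def sqHit (p : Int) (L : List Int) (w : Nat) : Bool :=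
  L.any (fun i => decide (PySem.Int.mod (i * i) p ≠ 0 ∧ (PySem.Int.mod (i * i) p).toNat = w))

theorem foldl_setA_size (m : Int → Nat) (L : List Int) (t : Array Int) :
    (L.foldl (fun t i => t.setIfInBounds (m i) 1) t).size = t.size := by
  induction L generalizing t with
  | nil => rfl
  | cons x L ih => simp [List.foldl_cons, ih, Array.size_setIfInBounds]

theorem foldl_setA_getElem? (m : Int → Nat) (L : List Int) (t : Array Int) (j : Nat) :
    (L.foldl (fun t i => t.setIfInBounds (m i) 1) t)[j]? =
      if ∃ i ∈ L, m i = j then (if j < t.size then some 1 else none) else t[j]? := by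
  induction L generalizing t with
  | nil => simp
  | cons x L ih =>
    rw [List.foldl_cons, ih]
    simp only [Array.size_setIfInBounds, Array.getElem?_setIfInBounds, List.mem_cons]
    by_cases hL : ∃ i ∈ L, m i = j
    · simp [hL]
    · by_cases hx : m x = j
      · simp [hL, hx]
      · simp [hL, hx]

theorem tbl_lookup (p : Int) (hp : 1 ≤ p) (j : Int) (h0 : 0 ≤ j) (hj : j < p) :
    (find_legendre_symbols p).getD j.toNat 0 = clsv p j := by
  have hjlt : j.toNat < p.toNat := by omega
  rw [Array.getD_eq_getD_getElem?]
  unfold find_legendre_symbols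
  rw [Array.getElem?_setIfInBounds, foldl_setA_getElem?]
  have hmem : (∃ i ∈ PySem.List.pyRange 1 p 1, (PySem.Int.mod (i * i) p).toNat = j.toNat) ↔
      j ∈ sqL p := by
    constructor
    · rintro ⟨i, hi, hm⟩
      have h1 : 0 ≤ PySem.Int.mod (i * i) p := PySem.Int.mod_nonneg _ (by omega)
      have hc := congrArg (Nat.cast : Nat → Int) hm
      rw [Int.toNat_of_nonneg h1, Int.toNat_of_nonneg h0] at hc
      exact hc ▸ List.mem_map_of_mem hi
    · intro hmem
      rcases List.mem_map.mp hmem with ⟨i, hi, hm⟩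
      exact ⟨i, hi, by rw [hm]⟩
  by_cases hz : j = 0
  · have hjn : (0 : Nat) = j.toNat := by rw [hz]; rfl
    rw [if_pos hjn, if_pos (by rw [foldl_setA_size, Array.size_replicate]; omega)]
    simp [clsv, hz]
  · have hne : ¬ ((0 : Nat) = j.toNat) := by omega
    rw [if_neg hne]
    simp only [hmem, Array.getElem?_replicate, Array.size_replicate, hjlt, if_true]
    by_cases hq : j ∈ sqL p <;> simp [clsv, hz, hq]

theorem foldl_const_iterate {α β : Type} (h : α → α) (L : List β) (s : α) :
    L.foldl (fun s _ => h s) s = h^[L.length] s := by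
  induction L generalizing s with
  | nil => rfl
  | cons x L ih => simp [List.foldl_cons, ih, Function.iterate_succ_apply]

theorem addmod (p u v : Int) (hp : 0 < p) :
    (if PySem.Int.mod u p + PySem.Int.mod v p ≥ p
      then PySem.Int.mod u p + PySem.Int.mod v p - p
      else PySem.Int.mod u p + PySem.Int.mod v p) = PySem.Int.mod (u + v) p := by
  have hu0 := PySem.Int.mod_nonneg u hp
  have hu1 := PySem.Int.mod_lt u hp
  have hv0 := PySem.Int.mod_nonneg v hp
  have hv1 := PySem.Int.mod_lt v hp
  simp only [PySem.Int.mod_eq_emod_of_pos hp] at *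
  rw [Int.add_emod]
  set s := u % p + v % p with hs
  split_ifs with h
  · rw [show s % p = (s - p) % p by rw [Int.sub_emod_right]]
    exact (Int.emod_eq_of_lt (by omega) (by omega)).symm
  · exact (Int.emod_eq_of_lt (by omega) (by omega)).symm

theorem iterA (p aa bb c : Int) (hp : 0 < p) (tbl : Array Int) (k : Nat) :
    (fun (s : Int × Int × Int × Int) =>
        (if s.1 + s.2.1 ≥ p then s.1 + s.2.1 - p else s.1 + s.2.1,
         if s.2.1 + s.2.2.1 ≥ p then s.2.1 + s.2.2.1 - p else s.2.1 + s.2.2.1,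
         if PySem.Int.mod 6 p + s.2.2.1 ≥ p then PySem.Int.mod 6 p + s.2.2.1 - p
           else PySem.Int.mod 6 p + s.2.2.1,
         s.2.2.2 + tbl.getD
           (if s.1 + s.2.1 ≥ p then s.1 + s.2.1 - p else s.1 + s.2.1).toNat 0))^[k]
      (PySem.Int.mod bb p, PySem.Int.mod (aa + 1) p, PySem.Int.mod 6 p, c)
    = (PySem.Int.mod ((k : Int) ^ 3 + aa * k + bb) p,
       PySem.Int.mod (3 * (k : Int) ^ 2 + 3 * k + aa + 1) p,
       PySem.Int.mod (6 * (k : Int) + 6) p,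
       c + ((List.range k).map (fun (j : Nat) =>
         tbl.getD
           (PySem.Int.mod (((j : Int) + 1) ^ 3 + aa * ((j : Int) + 1) + bb) p).toNat 0)).sum) := by
  induction k with
  | zero => norm_num
  | succ k ih =>
    rw [Function.iterate_succ_apply', ih]
    dsimp only
    have e1 : ((k : Int) ^ 3 + aa * k + bb) + (3 * (k : Int) ^ 2 + 3 * k + aa + 1)
        = ((k + 1 : Nat) : Int) ^ 3 + aa * ((k + 1 : Nat) : Int) + bb := by push_cast; ring
    have e2 : (3 * (k : Int) ^ 2 + 3 * k + aa + 1) + (6 * (k : Int) + 6)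
        = 3 * ((k + 1 : Nat) : Int) ^ 2 + 3 * ((k + 1 : Nat) : Int) + aa + 1 := by
      push_cast; ring
    have e3 : (6 : Int) + (6 * (k : Int) + 6) = 6 * ((k + 1 : Nat) : Int) + 6 := by
      push_cast; ring
    rw [addmod p _ _ hp, addmod p _ _ hp, addmod p _ _ hp, e1, e2, e3, List.range_succ]
    simp only [List.map_append, List.map_cons, List.map_nil, List.sum_append, List.sum_cons,
      List.sum_nil, add_zero, Nat.cast_add, Nat.cast_one, add_assoc]

theorem A_eq_sum (p aa bb : Int) (hp : 1 ≤ p) :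
    compute_ap p aa bb =
      ((PySem.List.pyRange 0 p 1).map (fun x =>
        (find_legendre_symbols p).getD
          (PySem.Int.mod (x ^ 3 + aa * x + bb) p).toNat 0)).sum := by
  have hp0 : (0 : Int) < p := by omega
  have h01 : PySem.List.pyRange 0 1 1 = [0] := by decide
  rw [PySem.List.pyRange_one_append 0 1 p (by omega) (by omega), h01,
    PySem.List.pyRange_one 1 p]
  simp only [List.map_append, List.sum_append, List.map_cons, List.map_nil, List.sum_cons,
    List.sum_nil, List.map_map]
  simp only [compute_ap, fA, del_f, del_2_f]
  rw [foldl_const_iterate]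
  rw [PySem.List.length_pyRange_one]
  rw [show (0 : Int) ^ 3 + aa * 0 + bb = bb by ring, show 3 * (0:Int) ^ 2 + 3 * 0 + aa + 1 = aa + 1 by ring,
    show 6 * (0 : Int) + 6 = 6 by ring]
  rw [iterA p aa bb _ hp0]
  simp only [Function.comp_def]
  congr 1
  · norm_num
  · refine congrArg List.sum (List.map_congr_left fun j _ => ?_)
    congr 3
    ring

-- A as the plain character sum over x
theorem A_eq_cls (p aa bb : Int) (hp : 1 ≤ p) :
    compute_ap p aa bb =
      ((PySem.List.pyRange 0 p 1).map (fun x =>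
        clsv p (PySem.Int.mod (x ^ 3 + aa * x + bb) p))).sum := by
  have hp0 : (0 : Int) < p := hp
  rw [A_eq_sum p aa bb hp]
  refine congrArg List.sum (List.map_congr_left fun x hx => ?_)
  exact tbl_lookup p hp _ (PySem.Int.mod_nonneg _ hp0) (PySem.Int.mod_lt _ hp0)

-- histogram loop: bucket j ends up holding its start value plus the number of hits
theorem hist_size (k : Int → Nat) (L : List Int) (A : Array Int) :
    (L.foldl (fun c x => c.modify (k x) (· + 1)) A).size = A.size := by
  induction L generalizing A with
  | nil => rfl
  | cons x L ih => simp [List.foldl_cons, ih, Array.size_modify]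

theorem hist_getD (k : Int → Nat) (L : List Int) (A : Array Int) (j : Nat) (hj : j < A.size) :
    (L.foldl (fun c x => c.modify (k x) (· + 1)) A).getD j 0 =
      A.getD j 0 + (L.countP (fun x => k x == j) : Int) := by
  induction L generalizing A with
  | nil => simp
  | cons x L ih =>
    rw [List.foldl_cons, ih _ (by simp [Array.size_modify, hj]), List.countP_cons]
    simp only [Array.getD_eq_getD_getElem?, Array.getElem?_modify]
    by_cases hx : k x = j
    · simp only [hx, if_pos rfl, beq_self_eq_true, if_true,
        Array.getElem?_eq_getElem hj, Option.map_some, Option.getD_some]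
      push_cast
      ring
    · simp only [if_neg hx, beq_iff_eq, hx, if_false]
      push_cast
      ring

-- a sum over range n of a single-index indicator
theorem sum_ite_single (n j : Nat) (g : Nat → Int) (hj : j < n) :
    ((List.range n).map (fun w => if w = j then g w else 0)).sum = g j := by
  induction n with
  | zero => omega
  | succ n ih =>
    rw [List.range_succ]
    simp only [List.map_append, List.sum_append, List.map_cons, List.map_nil, List.sum_cons,
      List.sum_nil, add_zero]
    by_cases h : j = n
    · subst h
      rw [if_pos rfl]
      have : ((List.range j).map (fun w => if w = j then g w else 0)).sum = 0 := by
        apply List.sum_eq_zero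
        intro y hy
        rcases List.mem_map.mp hy with ⟨w, hw, rfl⟩
        have : w < j := List.mem_range.mp hw
        simp [Nat.ne_of_lt this]
      rw [this, zero_add]
    · rw [ih (by omega), if_neg (Ne.symm h), add_zero]

theorem sqHit_cons (p : Int) (i : Int) (L : List Int) (w : Nat) :
    sqHit p (i :: L) w =
      (decide (PySem.Int.mod (i * i) p ≠ 0 ∧ (PySem.Int.mod (i * i) p).toNat = w)
        || sqHit p L w) := by
  simp [sqHit]

-- the zeroing loop: resid collects each hit bucket exactly once
theorem zero_loop (p : Int) (L : List Int) (A : Array Int) (r : Int)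
    (hb : ∀ i ∈ L, (PySem.Int.mod (i * i) p).toNat < A.size) :
    (L.foldl (fun (s : Array Int × Int) i =>
        let v := PySem.Int.mod (i * i) p
        if v ≠ 0 then (s.1.setIfInBounds v.toNat 0, s.2 + s.1.getD v.toNat 0)
        else s) (A, r)).2
      = r + ((List.range A.size).map
          (fun w => if sqHit p L w then A.getD w 0 else 0)).sum := by
  induction L generalizing A r with
  | nil => simp [sqHit]
  | cons i L ih =>
    rw [List.foldl_cons]
    dsimp only
    by_cases hv : PySem.Int.mod (i * i) p ≠ 0
    · rw [if_pos hv]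
      set vt := (PySem.Int.mod (i * i) p).toNat with hvt
      have hlt : vt < A.size := hb i (List.mem_cons_self)
      have hsz : (A.setIfInBounds vt 0).size = A.size := Array.size_setIfInBounds
      rw [ih (A.setIfInBounds vt 0) (r + A.getD vt 0)
            (fun i' hi' => by rw [hsz]; exact hb i' (List.mem_cons_of_mem _ hi'))]
      rw [hsz]
      have hpt : ∀ w, (if sqHit p (i :: L) w then A.getD w 0 else 0)
          = (if sqHit p L w then (A.setIfInBounds vt 0).getD w 0 else 0)
            + (if w = vt then A.getD w 0 else 0) := by
        intro w
        have hset : (A.setIfInBounds vt 0).getD w 0 = if w = vt then 0 else A.getD w 0 := by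
          simp only [Array.getD_eq_getD_getElem?, Array.getElem?_setIfInBounds]
          by_cases hwv : w = vt
          · simp [hwv, hlt]
          · simp [hwv, Ne.symm hwv]
        rw [hset, sqHit_cons]
        by_cases hwv : w = vt
        · simp [hwv, hv, hvt]
        · have : ¬ (PySem.Int.mod (i * i) p ≠ 0 ∧ (PySem.Int.mod (i * i) p).toNat = w) := by
            rw [← hvt]; tauto
          simp only [hwv, if_false, add_zero, decide_eq_true_eq]
          rw [decide_eq_false this, Bool.false_or]
      calc r + A.getD vt 0 + ((List.range A.size).map
              (fun w => if sqHit p L w then (A.setIfInBounds vt 0).getD w 0 else 0)).sum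
          = r + (((List.range A.size).map
              (fun w => if sqHit p L w then (A.setIfInBounds vt 0).getD w 0 else 0)).sum
              + A.getD vt 0) := by ring
        _ = r + ((List.range A.size).map
              (fun w => if sqHit p (i :: L) w then A.getD w 0 else 0)).sum := by
              rw [show A.getD vt 0 = ((List.range A.size).map
                    (fun w => if w = vt then A.getD w 0 else 0)).sum from
                  (sum_ite_single A.size vt (fun w => A.getD w 0) hlt).symm,
                ← PySem.List.sum_map_add_int]
              exact congrArg (r + ·) (congrArg List.sum
                (List.map_congr_left fun w _ => (hpt w).symm))
    · rw [if_neg hv]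
      rw [ih A r (fun i' hi' => hb i' (List.mem_cons_of_mem _ hi'))]
      congr 1
      refine congrArg List.sum (List.map_congr_left fun w _ => ?_)
      rw [sqHit_cons, decide_eq_false (by tauto), Bool.false_or]

-- exchanging the order of summation: summing indicator buckets counts the elements
theorem exchange (xs : List Int) (n : Nat) (P : Nat → Bool) (k : Int → Nat)
    (hk : ∀ x ∈ xs, k x < n) :
    ((List.range n).map (fun w => if P w then (xs.countP (fun x => k x == w) : Int) else 0)).sum
      = (xs.countP (fun x => P (k x)) : Int) := by
  induction xs with
  | nil => simp
  | cons x xs ih =>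
    have hpt : ∀ w, (if P w then ((x :: xs).countP (fun x => k x == w) : Int) else 0)
        = (if P w then (xs.countP (fun x => k x == w) : Int) else 0)
          + (if w = k x then (if P w then 1 else 0) else 0) := by
      intro w
      by_cases hw : w = k x
      · subst hw
        rw [List.countP_cons]
        simp only [beq_self_eq_true, if_true, if_pos rfl]
        push_cast
        split_ifs <;> ring
      · have hne : (k x == w) = false := by
          rw [beq_eq_false_iff_ne]; exact fun h => hw h.symm
        rw [if_neg hw, add_zero, List.countP_cons, hne]
        norm_num
    calc ((List.range n).map
            (fun w => if P w then ((x :: xs).countP (fun x => k x == w) : Int) else 0)).sum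
        = ((List.range n).map (fun w =>
            (if P w then (xs.countP (fun x => k x == w) : Int) else 0)
              + (if w = k x then (if P w then 1 else 0) else 0))).sum := by
          exact congrArg List.sum (List.map_congr_left fun w _ => hpt w)
      _ = ((List.range n).map
            (fun w => if P w then (xs.countP (fun x => k x == w) : Int) else 0)).sum
          + ((List.range n).map (fun w => if w = k x then (if P w then 1 else 0) else 0)).sum := by
          rw [← PySem.List.sum_map_add_int]
      _ = ((x :: xs).countP (fun x => P (k x)) : Int) := by
          rw [ih (fun x' hx' => hk x' (List.mem_cons_of_mem _ hx')),
            sum_ite_single n (k x) _ (hk x (List.mem_cons_self)), List.countP_cons]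
          split_ifs <;> push_cast <;> ring

-- the pointwise character sum as two counts
theorem cls_sum (p : Int) (xs : List Int) (F : Int → Int) :
    ((xs.map (fun x => clsv p (PySem.Int.mod (F x) p))).sum : Int)
      = 2 * (xs.countP (fun x => decide (PySem.Int.mod (F x) p ∈ sqL p
              ∧ PySem.Int.mod (F x) p ≠ 0)) : Int)
        + (xs.countP (fun x => PySem.Int.mod (F x) p == 0) : Int)
        - xs.length := by
  induction xs with
  | nil => simp
  | cons x xs ih =>
    simp only [List.map_cons, List.sum_cons, List.countP_cons, List.length_cons]
    rw [ih]
    unfold clsv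
    by_cases h0 : PySem.Int.mod (F x) p = 0
    · simp only [h0, if_pos rfl]
      norm_num
      push_cast
      ring
    · by_cases hq : PySem.Int.mod (F x) p ∈ sqL p
      · simp only [if_neg h0, if_pos hq, decide_eq_true_eq]
        simp [h0, hq]
        push_cast
        ring
      · simp only [if_neg h0, if_neg hq]
        simp [h0, hq]
        push_cast
        ring

-- bridge: the Bool bucket predicate says exactly "a nonzero quadratic residue"
theorem sqHit_iff (p : Int) (hp : 1 ≤ p) (w : Nat) :
    sqHit p (PySem.List.pyRange 1 p 1) w = true ↔ ((w : Int) ∈ sqL p ∧ (w : Int) ≠ 0) := by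
  simp only [sqHit, List.any_eq_true, decide_eq_true_eq]
  constructor
  · rintro ⟨i, hi, hnz, hw⟩
    have h1 : 0 ≤ PySem.Int.mod (i * i) p := PySem.Int.mod_nonneg _ (by omega)
    have hc := congrArg (Nat.cast : Nat → Int) hw
    rw [Int.toNat_of_nonneg h1] at hc
    exact ⟨hc ▸ List.mem_map_of_mem hi, hc ▸ hnz⟩
  · rintro ⟨hmem, hnz⟩
    rcases List.mem_map.mp hmem with ⟨i, hi, hm⟩
    refine ⟨i, hi, ?_, ?_⟩
    · rw [hm]; exact hnz
    · rw [hm, Int.toNat_natCast]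

-- ===== VERDICT (by name: the statement is the Claim_ definition above) =====
theorem compute_ap_spec : Claim_equal_compute_ap := by
  intro p aa bb _ hpre
  unfold Spec_compute_ap
  have hp0 : (0 : Int) < p := hpre
  set F : Int → Int := fun x => x ^ 3 + aa * x + bb with hF
  set k : Int → Nat := fun x => (PySem.Int.mod (F x) p).toNat with hk
  set xs := PySem.List.pyRange 0 p 1 with hxs
  -- the histogram in B's port
  have hsz : ((xs.foldl (fun c x => c.modify (k x) (· + 1))
      (Array.replicate p.toNat (0 : Int)))).size = p.toNat := by
    rw [hist_size, Array.size_replicate]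
  have hcnt : ∀ j, j < p.toNat →
      (xs.foldl (fun c x => c.modify (k x) (· + 1))
        (Array.replicate p.toNat (0 : Int))).getD j 0
      = (xs.countP (fun x => k x == j) : Int) := by
    intro j hj
    rw [hist_getD k xs _ j (by rwa [Array.size_replicate])]
    simp [Array.getD_eq_getD_getElem?, Array.getElem?_replicate, hj]
  have hklt : ∀ x, k x < p.toNat := by
    intro x
    have := PySem.Int.mod_lt (F x) hp0
    have := PySem.Int.mod_nonneg (F x) hp0
    simp only [hk]
    omega
  have hknn : ∀ x, ((k x : Int)) = PySem.Int.mod (F x) p := by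
    intro x
    exact Int.toNat_of_nonneg (PySem.Int.mod_nonneg (F x) hp0)
  -- unfold B
  show compute_ap p aa bb = compute_ap_alt p aa bb
  simp only [compute_ap_alt]
  rw [show (fun (c : Array Int) (x : Int) =>
        c.modify (PySem.Int.mod (x ^ 3 + aa * x + bb) p).toNat (· + 1))
      = fun c x => c.modify (k x) (· + 1) from rfl]
  rw [zero_loop p _ _ _ (fun i _ => by
        rw [hsz]
        have := PySem.Int.mod_lt (i * i) hp0
        have := PySem.Int.mod_nonneg (i * i) hp0
        omega)]
  rw [hsz, zero_add]
  -- replace array reads by counts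
  rw [show ((List.range p.toNat).map (fun w =>
        if sqHit p (PySem.List.pyRange 1 p 1) w then
          (xs.foldl (fun c x => c.modify (k x) (· + 1))
            (Array.replicate p.toNat (0 : Int))).getD w 0
        else 0)).sum
      = ((List.range p.toNat).map (fun w =>
        if sqHit p (PySem.List.pyRange 1 p 1) w then
          (xs.countP (fun x => k x == w) : Int) else 0)).sum from
    congrArg List.sum (List.map_congr_left fun w hw => by
      rw [hcnt w (List.mem_range.mp hw)])]
  rw [exchange xs p.toNat _ k (fun x _ => hklt x)]
  rw [hcnt 0 (by omega)]
  -- identify the two counts with the character-sum counts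
  rw [A_eq_cls p aa bb hpre]
  rw [cls_sum p xs F]
  have hc1 : xs.countP (fun x => decide (PySem.Int.mod (F x) p ∈ sqL p
        ∧ PySem.Int.mod (F x) p ≠ 0))
      = xs.countP (fun x => sqHit p (PySem.List.pyRange 1 p 1) (k x)) := by
    apply List.countP_congr
    intro x _
    rw [Bool.eq_iff_iff, decide_eq_true_eq, sqHit_iff p hpre (k x), hknn x]
    simp
  have hc2 : xs.countP (fun x => PySem.Int.mod (F x) p == 0)
      = xs.countP (fun x => k x == 0) := by
    apply List.countP_congr
    intro x _
    rw [Bool.eq_iff_iff, beq_iff_eq, beq_iff_eq]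
    have h := hknn x
    constructor
    · intro hz
      have hc0 : ((k x : Nat) : Int) = 0 := by rw [h, hz]
      exact_mod_cast hc0
    · intro hz
      rw [← h, hz]
      simp
  have hlen : (xs.length : Int) = p := by
    rw [hxs, PySem.List.length_pyRange_one]
    omega
  rw [hc1, hc2, hlen]
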